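-- pv_equiv track=rewrite | github.com/leah-1ee/coding-test-study | 프로그래머스/1/134240. 푸드 파이트 대회/푸드 파이트 대회.py | solution
-- ===== SOURCE A (Python) =====
-- def solution(food):
--     answer = ''
--     n = len(food)
--
--     # 1. 앞쪽 음식 배치 : 순서대로 음식 수 // 2 개 배치
--     for i in range(1, n):
--         answer += str(i) * (food[i]//2)
--
--     # 2. 물 배치 : 0
--     answer += '0'
--
--     # 3. 뒤쪽 음식 배치 : 역순으로 음식 수 // 2 개 배치
--     for i in range(n-1, 0, -1):
--         answer += str(i) * (food[i]//2)
--
--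
--     return answer
-- ===== SOURCE B (Python) =====
-- def solution(food):
--     out = ['0']
--     for i in range(len(food) - 1, 0, -1):
--         t = str(i) * (food[i] // 2)
--         out.insert(0, t)
--         out.append(t)
--     return ''.join(out)
-- ===== Notes on version B (the rewrite author's own statement) =====
-- stated objective: alternative
-- what changed: B builds the palindrome inside-out with a single descending loop that wraps each food's token around both ends of a growing token list centred on '0' (insert at front, append at back), joining once at the end, instead of A's two independent index loops (forward then backward) appending to one flat string.
import Mathlib
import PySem

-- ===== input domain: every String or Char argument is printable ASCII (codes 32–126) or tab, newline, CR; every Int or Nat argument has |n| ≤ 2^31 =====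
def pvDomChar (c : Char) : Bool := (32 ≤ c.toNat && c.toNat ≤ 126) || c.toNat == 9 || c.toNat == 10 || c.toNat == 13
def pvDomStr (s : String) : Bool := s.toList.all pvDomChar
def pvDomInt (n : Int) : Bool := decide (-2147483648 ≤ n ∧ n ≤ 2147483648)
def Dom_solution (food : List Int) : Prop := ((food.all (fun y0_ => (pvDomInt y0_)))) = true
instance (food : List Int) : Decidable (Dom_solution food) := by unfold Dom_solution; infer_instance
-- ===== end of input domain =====

-- B builds the palindrome inside-out: one descending loop wraps each token around both ends of a token list centred on '0' (insert at 0 / append), joined once; A runs two index loops appending to a flat string. Equivalence proved below.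

-- ===== PORT A =====
-- str(i) * (food[i] // 2) for one index i (i is always in range, so pyGetD's default is never used)
def pvTokA (food : List Int) (i : Int) : List Char :=
  PySem.List.pyRepeat (PySem.Int.toChars i) (PySem.Int.floordiv (PySem.List.pyGetD food i 0) 2)

def solution (food : List Int) : String :=
  let n : Int := food.length
  let answer : List Char := []
  -- for i in range(1, n): answer += str(i) * (food[i]//2)
  let answer := (PySem.List.pyRange 1 n 1).foldl (fun acc i => acc ++ pvTokA food i) answer
  -- answer += '0'
  let answer := answer ++ ['0']
  -- for i in range(n-1, 0, -1): answer += str(i) * (food[i]//2)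
  let answer := (PySem.List.pyRange (n - 1) 0 (-1)).foldl (fun acc i => acc ++ pvTokA food i) answer
  String.ofList answer

-- ===== PORT B =====
def solution_alt (food : List Int) : String :=
  -- out = ['0']; for i in range(len(food)-1, 0, -1): out.insert(0, t); out.append(t)
  let out : List (List Char) := [['0']]
  let out := (PySem.List.pyRange ((food.length : Int) - 1) 0 (-1)).foldl
    (fun acc i =>
      let t := PySem.List.pyRepeat (PySem.Int.toChars i) (PySem.Int.floordiv (PySem.List.pyGetD food i 0) 2)
      (PySem.List.insert acc 0 t) ++ [t]) out
  -- ''.join(out)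
  String.ofList (PySem.Chars.join [] out)

-- ===== PRECONDITION & SPEC =====
def Spec_solution (food : List Int) (out : String) : Prop := out = solution_alt food
instance (food : List Int) (out : String) : Decidable (Spec_solution food out) := by unfold Spec_solution; infer_instance

-- ===== CLAIM =====
def Claim_equal_solution : Prop := ∀ (food : List Int), Dom_solution food → Spec_solution food (solution food)

-- ===== LEMMAS AND PROOFS =====

-- ''.join with empty separator is flatten
theorem pv_join_nil_eq_flatten (parts : List (List Char)) :
    PySem.Chars.join [] parts = parts.flatten := by
  simp [PySem.Chars.join, List.intercalate]
  induction parts with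
  | nil => rfl
  | cons p t ih => cases t <;> simp_all [List.intersperse]

-- the inside-out wrapping fold over l.reverse yields front tokens ++ middle ++ mirrored tokens
theorem pv_wrap_foldl (food : List Int) (m : List (List Char)) (l : List Int) :
    l.reverse.foldl
      (fun acc i =>
        let t := PySem.List.pyRepeat (PySem.Int.toChars i) (PySem.Int.floordiv (PySem.List.pyGetD food i 0) 2)
        (PySem.List.insert acc 0 t) ++ [t]) m
    = l.map (fun i => pvTokA food i) ++ m ++ (l.reverse.map (fun i => pvTokA food i)) := by
  induction l with
  | nil => simp
  | cons a t ih =>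
    simp only [List.reverse_cons, List.foldl_append, List.foldl_cons, List.foldl_nil, ih,
      List.map_cons, List.map_append, List.map_reverse]
    simp [pvTokA, PySem.List.insert_zero, List.append_assoc]

-- ===== VERDICT =====
theorem solution_spec : Claim_equal_solution := by
  intro food _
  show solution food = solution_alt food
  unfold solution solution_alt
  have hrev : PySem.List.pyRange ((food.length : Int) - 1) 0 (-1)
      = (PySem.List.pyRange 1 (food.length : Int) 1).reverse := by
    simpa using PySem.List.pyRange_neg_one_eq_reverse ((food.length : Int) - 1) 0
  rw [hrev]
  simp only [pv_wrap_foldl food [['0']] (PySem.List.pyRange 1 (food.length : Int) 1),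
    pv_join_nil_eq_flatten]
  simp only [PySem.List.foldl_append_eq_flatMap, List.flatten_append, List.flatten_cons,
    List.flatten_nil, ← List.flatMap_def, List.append_assoc, List.nil_append, List.append_nil]
  rw [hrev]
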